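-- pv_equiv track=rewrite | github.com/ronezz/SI | LAB2/client.py | lagrange_at_zero
-- ===== SOURCE A (Python) =====
-- FR_MOD = int("73eda753299d7d483339d80809a1d80553bda402fffe5bfeffffffff00000001", 16)
--
-- def lagrange_at_zero(points):
--     s = 0
--     for i, (x_i, y_i) in enumerate(points):
--         num, den = 1, 1
--         for j, (x_j, _) in enumerate(points):
--             if i == j:
--                 continue
--             num = (num * (-x_j % FR_MOD)) % FR_MOD
--             den = (den * ((x_i - x_j) % FR_MOD)) % FR_MOD
--         li0 = num * pow(den, FR_MOD - 2, FR_MOD) % FR_MOD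
--         s = (s + y_i * li0) % FR_MOD
--     return s
-- ===== SOURCE B (Python) =====
-- FR_MOD = int("73eda753299d7d483339d80809a1d80553bda402fffe5bfeffffffff00000001", 16)
--
-- def lagrange_at_zero(points):
--     # Numerators via prefix/suffix products of (-x mod p); denominators via the
--     # derivative of the node polynomial M(X) = prod (X - x_j), built once, so the
--     # per-point inner scan over all other points disappears.
--     negs = [(-x) % FR_MOD for x, _ in points]
--     pre = [1]
--     acc = 1
--     for v in negs:
--         acc = acc * v % FR_MOD
--         pre.append(acc)
--     suf = [1]
--     acc = 1
--     for v in reversed(negs):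
--         acc = acc * v % FR_MOD
--         suf.append(acc)
--     suf.reverse()
--     nums = [a * b % FR_MOD for a, b in zip(pre, suf[1:])]
--     # node polynomial coefficients (low to high), reduced mod p
--     m = [1]
--     for x, _ in points:
--         new = []
--         prev = 0
--         for c in m:
--             new.append((prev - x * c) % FR_MOD)
--             prev = c
--         new.append(prev)
--         m = new
--     # derivative coefficients of M
--     d = [(k + 1) * c % FR_MOD for k, c in enumerate(m[1:])]
--     s = 0
--     for (x_i, y_i), num in zip(points, nums):
--         den = 0
--         for c in reversed(d):
--             den = (den * x_i + c) % FR_MOD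
--         s = (s + y_i * (num * pow(den, FR_MOD - 2, FR_MOD) % FR_MOD)) % FR_MOD
--     return s
-- ===== Notes on version B (the rewrite author's own statement) =====
-- stated objective: alternative
-- what changed: A recomputes both inner products per point; B gets the numerators from one prefix-product and one suffix-product scan and the denominators by building the node polynomial M(X)=prod(X-x_j) once and Horner-evaluating its derivative at each x_i, so the per-point inner scan over all other points disappears.
import Mathlib
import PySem

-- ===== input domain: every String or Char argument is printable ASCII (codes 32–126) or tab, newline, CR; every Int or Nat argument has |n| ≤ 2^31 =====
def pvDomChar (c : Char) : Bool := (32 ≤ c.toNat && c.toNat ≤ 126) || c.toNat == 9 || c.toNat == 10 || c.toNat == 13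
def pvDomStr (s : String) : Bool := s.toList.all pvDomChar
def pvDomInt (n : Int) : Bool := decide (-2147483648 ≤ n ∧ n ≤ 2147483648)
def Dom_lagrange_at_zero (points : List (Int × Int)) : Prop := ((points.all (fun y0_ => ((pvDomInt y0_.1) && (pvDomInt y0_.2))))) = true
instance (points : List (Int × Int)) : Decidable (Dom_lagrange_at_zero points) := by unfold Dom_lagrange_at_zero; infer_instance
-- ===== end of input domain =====

-- B replaces A's per-point inner scans by prefix/suffix products (numerators) and by the
-- derivative of the node polynomial built once (denominators): an alternative algorithm,
-- same asymptotic cost (the modular inversions dominate).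

-- FR_MOD, the BLS12-381 scalar-field modulus (the hex literal in the Python, as decimal)
def pvP : Int := 52435875175126190479447740508185965837690552500527637822603658699938581184513
-- FR_MOD - 2, the exponent both programs pass to pow
def pvE : Nat := 52435875175126190479447740508185965837690552500527637822603658699938581184511

-- Hand port of Python's pow(b, e, m) by square-and-multiply, exact for m > 1 and e ≥ 0 as both
-- programs call it (PySem.Int.powMod is b ^ e % m, whose evaluation is infeasible at this exponent).
def pvPowMod (b : Int) (e : Nat) (m : Int) : Int :=
  if h : e = 0 then 1 % m
  else
    let half := pvPowMod (b * b % m) (e / 2) m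
    if e % 2 = 1 then half * b % m else half
termination_by e
decreasing_by exact Nat.div_lt_self (Nat.pos_of_ne_zero h) one_lt_two

-- ===== PORT A =====
def lagrange_at_zero (points : List (Int × Int)) : Int :=
  (PySem.List.enumerate points).foldl (fun s iq =>
    let nd := (PySem.List.enumerate points).foldl (fun nd jq =>
      if iq.1 = jq.1 then nd
      else (PySem.Int.mod (nd.1 * PySem.Int.mod (-jq.2.1) pvP) pvP,
            PySem.Int.mod (nd.2 * PySem.Int.mod (iq.2.1 - jq.2.1) pvP) pvP)) (1, 1)
    let li0 := PySem.Int.mod (nd.1 * pvPowMod nd.2 pvE pvP) pvP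
    PySem.Int.mod (s + iq.2.2 * li0) pvP) 0

-- ===== PORT B =====
def lagrange_at_zero_alt (points : List (Int × Int)) : Int :=
  let negs := points.map (fun q => PySem.Int.mod (-q.1) pvP)
  let pre := (negs.foldl (fun st v =>
      let acc := PySem.Int.mod (st.2 * v) pvP
      (st.1 ++ [acc], acc)) ([1], 1)).1
  let suf := ((negs.reverse.foldl (fun st v =>
      let acc := PySem.Int.mod (st.2 * v) pvP
      (st.1 ++ [acc], acc)) ([1], 1)).1).reverse
  let nums := (pre.zip (PySem.List.slice suf (some 1))).map (fun ab => PySem.Int.mod (ab.1 * ab.2) pvP)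
  let m := points.foldl (fun m q =>
      let st := m.foldl (fun st c => (st.1 ++ [PySem.Int.mod (st.2 - q.1 * c) pvP], c)) ([], 0)
      st.1 ++ [st.2]) [1]
  let d := (PySem.List.enumerate (PySem.List.slice m (some 1))).map
      (fun kc => PySem.Int.mod ((kc.1 + 1) * kc.2) pvP)
  (points.zip nums).foldl (fun s pn =>
      let den := d.reverse.foldl (fun den c => PySem.Int.mod (den * pn.1.1 + c) pvP) 0
      PySem.Int.mod (s + pn.1.2 * (PySem.Int.mod (pn.2 * pvPowMod den pvE pvP) pvP)) pvP) 0

-- ===== PRECONDITION & SPEC =====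
def Spec_lagrange_at_zero (points : List (Int × Int)) (out : Int) : Prop := out = lagrange_at_zero_alt points
instance (points : List (Int × Int)) (out : Int) : Decidable (Spec_lagrange_at_zero points out) := by unfold Spec_lagrange_at_zero; infer_instance

-- ===== CLAIM (what is proved, stated in full; the proofs are below) =====
def Claim_equal_lagrange_at_zero : Prop := ∀ (points : List (Int × Int)), Dom_lagrange_at_zero points → Spec_lagrange_at_zero points (lagrange_at_zero points)

-- ===== LEMMAS AND PROOFS =====

lemma pvP_pos : (0:Int) < pvP := by norm_num [pvP]

lemma pvP_one_lt : (1:Int) < pvP := by norm_num [pvP]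

lemma pm (a : Int) : PySem.Int.mod a pvP = a % pvP := PySem.Int.mod_eq_emod_of_pos pvP_pos

-- bounded: a value already reduced mod pvP
def pvB (a : Int) : Prop := 0 ≤ a ∧ a < pvP

lemma pvB_emod (a : Int) : pvB (a % pvP) :=
  ⟨Int.emod_nonneg a (by exact ne_of_gt pvP_pos), Int.emod_lt_of_pos a pvP_pos⟩

lemma pvB_one : pvB 1 := ⟨by norm_num, pvP_one_lt⟩

lemma pv_eq_of_B {a b : Int} (ha : pvB a) (hb : pvB b) (h : a % pvP = b % pvP) : a = b := by
  rw [Int.emod_eq_of_lt ha.1 ha.2, Int.emod_eq_of_lt hb.1 hb.2] at h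
  exact h

lemma pv_emod_emod (a : Int) : a % pvP % pvP = a % pvP := Int.emod_emod_of_dvd a dvd_rfl

-- exact (unreduced) reference values
def pvXs (points : List (Int × Int)) : List Int := points.map Prod.fst
def pvNUM (xs : List Int) (i : ℕ) : Int := (((xs.eraseIdx i).map (fun a => -a)).prod) % pvP
def pvDEN (xs : List Int) (i : ℕ) : Int := (((xs.eraseIdx i).map (fun a => xs.getD i 0 - a)).prod) % pvP
def pvLI0 (xs : List Int) (i : ℕ) : Int := (pvNUM xs i * pvPowMod (pvDEN xs i) pvE pvP) % pvP

def pvGen (s : Int) (q : Int × Int) : Int := (s + q.1 * q.2) % pvP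
def pvCanon (points : List (Int × Int)) : List (Int × Int) :=
  (List.range points.length).map (fun i => ((points.getD i (0,0)).2, pvLI0 (pvXs points) i))

-- enumerate basics
lemma pv_enum_cons {α : Type} (a : α) (l : List α) (k : Int) :
    PySem.List.enumerate (a :: l) k = (k, a) :: PySem.List.enumerate l (k + 1) := by
  simp [PySem.List.enumerate]

lemma pv_enum_len {α : Type} (l : List α) (k : Int) :
    (PySem.List.enumerate l k).length = l.length := by
  induction l generalizing k with
  | nil => simp [PySem.List.enumerate]
  | cons a t ih => rw [pv_enum_cons]; simp [ih]

lemma pv_enum_get {α : Type} (l : List α) (k : Int) (i : ℕ) (h : i < l.length) :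
    (PySem.List.enumerate l k)[i]'(by rw [pv_enum_len]; exact h) = (k + (i:Int), l[i]) := by
  induction l generalizing k i with
  | nil => simp at h
  | cons a t ih =>
    cases i with
    | zero => simp
    | succ j =>
      have h' : j < t.length := by simpa using h
      have := ih (k + 1) j h'
      simp only [pv_enum_cons, List.getElem_cons_succ, this, Prod.mk.injEq]
      exact ⟨by push_cast; ring, trivial⟩

lemma pv_enum_map {α β : Type} (f : α → β) (l : List α) (k : Int) :
    PySem.List.enumerate (l.map f) k = (PySem.List.enumerate l k).map (fun kc => (kc.1, f kc.2)) := by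
  induction l generalizing k with
  | nil => simp [PySem.List.enumerate]
  | cons a t ih => simp [ih]



lemma pv_mulmod_left (x v : Int) : ((x % pvP) * v) % pvP = (x * v) % pvP := by
  simp [Int.mul_emod, Int.emod_emod_of_dvd]

lemma pv_absorb (a u v : Int) : (a * (u % pvP) * v) % pvP = (a * (u * v)) % pvP := by
  rw [← mul_assoc]
  simp [Int.mul_emod, Int.emod_emod_of_dvd]

-- the elements the inner A-loop does not skip (index ≠ i), x-components only
def pvSel (l : List (Int × Int)) (k i : Int) : List Int :=
  (PySem.List.enumerate l k).filterMap (fun jq => if i = jq.1 then none else some jq.2.1)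

lemma pv_sel_no_hit (l : List (Int × Int)) (k i : Int) (h : i < k) :
    pvSel l k i = l.map Prod.fst := by
  induction l generalizing k with
  | nil => simp [pvSel, PySem.List.enumerate]
  | cons q t ih =>
    have : ¬ (i = k) := by omega
    simp [pvSel, this]
    have := ih (k + 1) (by omega)
    simpa [pvSel] using this

lemma pv_sel_split (l : List (Int × Int)) (k : Int) (i : ℕ) (h : i < l.length) :
    pvSel l k (k + i) = ((l.map Prod.fst).eraseIdx i) := by
  induction l generalizing k i with
  | nil => simp at h
  | cons q t ih =>
    cases i with
    | zero =>
      simp only [pvSel, pv_enum_cons, List.filterMap_cons, Nat.cast_zero, add_zero, if_pos rfl]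
      have := pv_sel_no_hit t (k + 1) k (by omega)
      simpa [pvSel] using this
    | succ j =>
      have hne : k + (((j:ℕ)+1 : ℕ) : Int) ≠ k := by push_cast; omega
      have hj : j < t.length := by simpa using h
      have harg : k + (((j:ℕ)+1 : ℕ) : Int) = (k + 1) + (j:Int) := by push_cast; ring
      have hrec := ih (k + 1) j hj
      simp only [pvSel, pv_enum_cons, List.filterMap_cons, if_neg hne, List.map_cons,
        List.eraseIdx_cons_succ, List.cons.injEq, true_and]
      rw [harg]
      simpa [pvSel] using hrec

-- the inner loop of A: bounded and congruent to the products over the unskipped elements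
lemma pv_innerA (l : List (Int × Int)) (k i xi : Int) (a b : Int) (ha : pvB a) (hb : pvB b) :
    pvB ((PySem.List.enumerate l k).foldl (fun nd jq =>
        if i = jq.1 then nd
        else ((nd.1 * (-jq.2.1 % pvP)) % pvP, (nd.2 * ((xi - jq.2.1) % pvP)) % pvP)) (a, b)).1 ∧
    pvB ((PySem.List.enumerate l k).foldl (fun nd jq =>
        if i = jq.1 then nd
        else ((nd.1 * (-jq.2.1 % pvP)) % pvP, (nd.2 * ((xi - jq.2.1) % pvP)) % pvP)) (a, b)).2 ∧
    ((PySem.List.enumerate l k).foldl (fun nd jq =>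
        if i = jq.1 then nd
        else ((nd.1 * (-jq.2.1 % pvP)) % pvP, (nd.2 * ((xi - jq.2.1) % pvP)) % pvP)) (a, b)).1 % pvP
      = (a * ((pvSel l k i).map (fun x => -x)).prod) % pvP ∧
    ((PySem.List.enumerate l k).foldl (fun nd jq =>
        if i = jq.1 then nd
        else ((nd.1 * (-jq.2.1 % pvP)) % pvP, (nd.2 * ((xi - jq.2.1) % pvP)) % pvP)) (a, b)).2 % pvP
      = (b * ((pvSel l k i).map (fun x => xi - x)).prod) % pvP := by
  induction l generalizing k a b with
  | nil =>
    refine ⟨ha, hb, ?_, ?_⟩ <;> simp [PySem.List.enumerate, pvSel]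
  | cons q t ih =>
    by_cases hiq : i = k
    · subst hiq
      rw [pv_enum_cons]
      simp only [List.foldl_cons, if_pos rfl]
      have := ih (i + 1) a b ha hb
      have hsel : pvSel (q :: t) i i = pvSel t (i + 1) i := by
        simp [pvSel, pv_enum_cons]
      rw [hsel]
      exact this
    · rw [pv_enum_cons]
      simp only [List.foldl_cons, if_neg hiq]
      have := ih (k + 1) ((a * (-q.1 % pvP)) % pvP) ((b * ((xi - q.1) % pvP)) % pvP)
        (pvB_emod _) (pvB_emod _)
      have hsel : pvSel (q :: t) k i = q.1 :: pvSel t (k + 1) i := by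
        simp [pvSel, pv_enum_cons, hiq]
      rw [hsel]
      refine ⟨this.1, this.2.1, ?_, ?_⟩
      · rw [this.2.2.1, List.map_cons, List.prod_cons, pv_mulmod_left, pv_absorb]
      · rw [this.2.2.2, List.map_cons, List.prod_cons, pv_mulmod_left, pv_absorb]

-- prefix-product scan (the pre/suf loops of B)
lemma pv_scanl (l : List Int) (L0 : List Int) (a : Int) (ha : pvB a) :
    l.foldl (fun st v => (st.1 ++ [(st.2 * v) % pvP], (st.2 * v) % pvP)) (L0, a)
      = (L0 ++ (List.range l.length).map (fun t => (a * (l.take (t+1)).prod) % pvP),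
         (a * l.prod) % pvP) := by
  induction l generalizing L0 a with
  | nil =>
    simp [Int.emod_eq_of_lt ha.1 ha.2]
  | cons v t ih =>
    simp only [List.foldl_cons]
    rw [ih (L0 ++ [(a * v) % pvP]) ((a * v) % pvP) (pvB_emod _)]
    simp only [Prod.mk.injEq]
    refine ⟨?_, ?_⟩
    · simp only [List.length_cons]
      rw [List.range_succ_eq_map, List.map_cons, List.map_map, List.append_assoc,
        List.singleton_append]
      congr 1
      congr 1
      · simp
      · apply List.map_congr_left
        intro u _
        simp only [Function.comp_apply, List.take_succ_cons, List.prod_cons]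
        rw [pv_mulmod_left, ← mul_assoc]
    · simp only [List.prod_cons]
      rw [pv_mulmod_left, ← mul_assoc]

lemma pv_prod_map_emod (l : List Int) : ((l.map (fun a => a % pvP)).prod) % pvP = l.prod % pvP := by
  induction l with
  | nil => rfl
  | cons a t ih =>
    simp only [List.map_cons, List.prod_cons]
    rw [Int.mul_emod, pv_emod_emod, ih, ← Int.mul_emod]

-- coefficient step: multiply a coefficient list by (X - x), exactly (no reduction)
def pvMStep (x prev : Int) : List Int → List Int
  | [] => [prev]
  | c :: t => (prev - x * c) :: pvMStep x c t

def pvMZ (xs : List Int) : List Int := xs.foldl (fun m x => pvMStep x 0 m) [1]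

lemma pv_mstep_port (x : Int) (mx : List Int) : ∀ (L0 : List Int) (prev : Int),
    (((mx.map (fun a => a % pvP)).foldl
        (fun st c => (st.1 ++ [(st.2 - x * c) % pvP], c)) (L0, prev % pvP)).1
      ++ [((mx.map (fun a => a % pvP)).foldl
        (fun st c => (st.1 ++ [(st.2 - x * c) % pvP], c)) (L0, prev % pvP)).2])
    = L0 ++ (pvMStep x prev mx).map (fun a => a % pvP) := by
  induction mx with
  | nil => intro L0 prev; simp [pvMStep]
  | cons c t ih =>
    intro L0 prev
    simp only [List.map_cons, List.foldl_cons]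
    have harg : ((prev % pvP) - x * (c % pvP)) % pvP = (prev - x * c) % pvP := by
      simp [Int.sub_emod, Int.mul_emod, Int.emod_emod_of_dvd]
    rw [harg, ih (L0 ++ [(prev - x * c) % pvP]) c]
    simp [pvMStep]

lemma pv_m_port (points : List (Int × Int)) :
    points.foldl (fun m q =>
        ((m.foldl (fun st c => (st.1 ++ [(st.2 - q.1 * c) % pvP], c)) ([], 0)).1
          ++ [(m.foldl (fun st c => (st.1 ++ [(st.2 - q.1 * c) % pvP], c)) ([], 0)).2])) [1]
      = (pvMZ (pvXs points)).map (fun a => a % pvP) := by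
  have main : ∀ (pts : List (Int × Int)) (macc : List Int),
      pts.foldl (fun m q =>
        ((m.foldl (fun st c => (st.1 ++ [(st.2 - q.1 * c) % pvP], c)) ([], 0)).1
          ++ [(m.foldl (fun st c => (st.1 ++ [(st.2 - q.1 * c) % pvP], c)) ([], 0)).2]))
        (macc.map (fun a => a % pvP))
      = ((pts.map Prod.fst).foldl (fun m x => pvMStep x 0 m) macc).map (fun a => a % pvP) := by
    intro pts
    induction pts with
    | nil => intro macc; simp
    | cons q t ih =>
      intro macc
      simp only [List.foldl_cons, List.map_cons]
      have step := pv_mstep_port q.1 macc [] 0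
      rw [show ((0:Int) % pvP) = 0 from by simp] at step
      rw [step, List.nil_append, ih (pvMStep q.1 0 macc)]
  rw [show ([1] : List Int) = ([1].map (fun a => a % pvP)) from by
      rw [List.map_singleton, Int.emod_eq_of_lt (by norm_num) pvP_one_lt]]
  exact main points [1]

-- polynomial evaluation / derivative evaluation on coefficient lists (low-to-high)
def pvEvalL (x : Int) : List Int → Int
  | [] => 0
  | c :: t => c + x * pvEvalL x t

def pvEvalDL (x : Int) : List Int → Int
  | [] => 0
  | _ :: t => pvEvalL x t + x * pvEvalDL x t

def pvProdN (x : Int) (l : List Int) : Int := (l.map (fun a => x - a)).prod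

def pvDN (x : Int) : List Int → Int
  | [] => 0
  | a :: t => pvProdN x t + (x - a) * pvDN x t

lemma pv_evalL_mstep (x a prev : Int) (m : List Int) :
    pvEvalL x (pvMStep a prev m) = prev + (x - a) * pvEvalL x m := by
  induction m generalizing prev with
  | nil => simp [pvMStep, pvEvalL]
  | cons c t ih => simp only [pvMStep, pvEvalL, ih c]; ring

lemma pv_evalDL_mstep (x a prev : Int) (m : List Int) :
    pvEvalDL x (pvMStep a prev m) = pvEvalL x m + (x - a) * pvEvalDL x m := by
  induction m generalizing prev with
  | nil => simp [pvMStep, pvEvalDL, pvEvalL]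
  | cons c t ih => simp only [pvMStep, pvEvalDL, pvEvalL, ih c, pv_evalL_mstep]; ring

lemma pv_evalDL_foldl (x : Int) (xs : List Int) : ∀ (m0 : List Int),
    pvEvalDL x (xs.foldl (fun m a => pvMStep a 0 m) m0)
      = pvProdN x xs * pvEvalDL x m0 + pvDN x xs * pvEvalL x m0 := by
  induction xs with
  | nil => intro m0; simp [pvProdN, pvDN]
  | cons a t ih =>
    intro m0
    simp only [List.foldl_cons, ih, pv_evalDL_mstep, pv_evalL_mstep, pvDN, pvProdN,
      List.map_cons, List.prod_cons]
    ring

lemma pv_evalDL_mz (x : Int) (xs : List Int) : pvEvalDL x (pvMZ xs) = pvDN x xs := by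
  rw [pvMZ, pv_evalDL_foldl]
  simp [pvEvalDL, pvEvalL]

lemma pv_prodN_zero (x : Int) (l : List Int) (h : x ∈ l) : pvProdN x l = 0 := by
  apply List.prod_eq_zero
  exact List.mem_map.2 ⟨x, h, sub_self x⟩

lemma pv_DN_get (xs : List Int) (i : ℕ) (h : i < xs.length) :
    pvDN (xs[i]) xs = ((xs.eraseIdx i).map (fun a => xs[i] - a)).prod := by
  induction xs generalizing i with
  | nil => simp at h
  | cons a t ih =>
    cases i with
    | zero => simp [pvDN, pvProdN]
    | succ j =>
      have hj : j < t.length := by simpa using h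
      have hmem : t[j] ∈ t := List.getElem_mem hj
      simp only [List.getElem_cons_succ, pvDN, pv_prodN_zero _ _ hmem, zero_add,
        List.eraseIdx_cons_succ, List.map_cons, List.prod_cons, ih j hj]

lemma pv_mulmod_right (a b : Int) : (a * (b % pvP)) % pvP = (a * b) % pvP := by
  simp [Int.mul_emod, Int.emod_emod_of_dvd]

lemma pv_mulmod2 (a b : Int) : ((a % pvP) * (b % pvP)) % pvP = (a * b) % pvP := by
  simp [Int.mul_emod, Int.emod_emod_of_dvd]

lemma pv_horner_step (a e x c : Int) (h : a % pvP = e % pvP) :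
    (a * x + c) % pvP = (e * x + c) % pvP := by
  rw [Int.add_emod, Int.mul_emod, h, ← Int.mul_emod, ← Int.add_emod]

-- Horner evaluation with reduction at each step (the den loop of B)
lemma pv_horner (x : Int) (l : List Int) :
    pvB (l.reverse.foldl (fun a c => (a * x + c) % pvP) 0) ∧
    (l.reverse.foldl (fun a c => (a * x + c) % pvP) 0) % pvP = pvEvalL x l % pvP := by
  induction l with
  | nil => exact ⟨⟨le_rfl, pvP_pos⟩, rfl⟩
  | cons c t ih =>
    rw [List.reverse_cons, List.foldl_append]
    simp only [List.foldl_cons, List.foldl_nil]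
    refine ⟨pvB_emod _, ?_⟩
    rw [pv_emod_emod, pv_horner_step _ _ x c ih.2]
    show (pvEvalL x t * x + c) % pvP = (c + x * pvEvalL x t) % pvP
    ring_nf

-- index-weighted evaluation of an enumerated tail is derivative evaluation
lemma pv_weighted (x : Int) (t : List Int) : ∀ (k : Int),
    pvEvalL x ((PySem.List.enumerate t k).map (fun kc => (kc.1 + 1) * kc.2))
      = k * pvEvalL x t + pvEvalDL x (0 :: t) := by
  induction t with
  | nil => intro k; simp [PySem.List.enumerate, pvEvalL, pvEvalDL]
  | cons c ts ih =>
    intro k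
    rw [pv_enum_cons]
    simp only [List.map_cons, pvEvalL, pvEvalDL, ih (k + 1)]
    ring

-- congruence: the reductions inside the weighted list do not change the value mod pvP
lemma pv_weighted_mod (x : Int) (l : List Int) : ∀ (k : Int),
    pvEvalL x ((PySem.List.enumerate l k).map (fun kc => ((kc.1 + 1) * (kc.2 % pvP)) % pvP)) % pvP
      = pvEvalL x ((PySem.List.enumerate l k).map (fun kc => (kc.1 + 1) * kc.2)) % pvP := by
  induction l with
  | nil => intro k; simp [PySem.List.enumerate]
  | cons c t ih =>
    intro k
    rw [pv_enum_cons]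
    simp only [List.map_cons, pvEvalL]
    rw [Int.add_emod, pv_emod_emod, pv_mulmod_right, Int.mul_emod x, ih (k + 1),
      ← Int.mul_emod, ← Int.add_emod]

lemma pv_mz_ne_nil (xs : List Int) : pvMZ xs ≠ [] := by
  have gen : ∀ (l : List Int) (m0 : List Int), m0 ≠ [] →
      l.foldl (fun m x => pvMStep x 0 m) m0 ≠ [] := by
    intro l
    induction l with
    | nil => intro m0 h; simpa using h
    | cons a t ih =>
      intro m0 _
      simp only [List.foldl_cons]
      apply ih
      cases m0 <;> simp [pvMStep]
  exact gen xs [1] (by simp)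

-- named pieces of the two ports (definitionally equal to the let-bound values)
def pvFA (points : List (Int × Int)) (iq : Int × (Int × Int)) : Int × Int :=
  (iq.2.2,
    (((PySem.List.enumerate points).foldl (fun nd jq =>
        if iq.1 = jq.1 then nd
        else ((nd.1 * (-jq.2.1 % pvP)) % pvP, (nd.2 * ((iq.2.1 - jq.2.1) % pvP)) % pvP)) (1, 1)).1
      * pvPowMod (((PySem.List.enumerate points).foldl (fun nd jq =>
        if iq.1 = jq.1 then nd
        else ((nd.1 * (-jq.2.1 % pvP)) % pvP, (nd.2 * ((iq.2.1 - jq.2.1) % pvP)) % pvP)) (1, 1)).2)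
          pvE pvP) % pvP)

lemma pv_A_shape (points : List (Int × Int)) :
    lagrange_at_zero points
      = (PySem.List.enumerate points).foldl (fun s iq => pvGen s (pvFA points iq)) 0 := by
  unfold lagrange_at_zero
  simp only [pm]
  rfl

lemma pv_li0A (points : List (Int × Int)) (i : ℕ) (h : i < points.length) :
    pvFA points ((0:Int) + (i:Int), points[i]) = (points[i].2, pvLI0 (pvXs points) i) := by
  have hxs : (pvXs points).length = points.length := by simp [pvXs]
  have inner := pv_innerA points 0 ((0:Int) + (i:Int)) points[i].1 1 1 pvB_one pvB_one
  have hsel : pvSel points 0 ((0:Int) + (i:Int)) = (pvXs points).eraseIdx i := by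
    rw [pv_sel_split points 0 i h]; rfl
  rw [hsel] at inner
  have hnum : (((PySem.List.enumerate points).foldl (fun nd jq =>
        if (0:Int) + (i:Int) = jq.1 then nd
        else ((nd.1 * (-jq.2.1 % pvP)) % pvP, (nd.2 * ((points[i].1 - jq.2.1) % pvP)) % pvP)) (1, 1)).1)
      = pvNUM (pvXs points) i := by
    apply pv_eq_of_B inner.1 (pvB_emod _)
    rw [inner.2.2.1, one_mul, pv_emod_emod]
  have hden : (((PySem.List.enumerate points).foldl (fun nd jq =>
        if (0:Int) + (i:Int) = jq.1 then nd
        else ((nd.1 * (-jq.2.1 % pvP)) % pvP, (nd.2 * ((points[i].1 - jq.2.1) % pvP)) % pvP)) (1, 1)).2)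
      = pvDEN (pvXs points) i := by
    apply pv_eq_of_B inner.2.1 (pvB_emod _)
    rw [inner.2.2.2, one_mul, pv_emod_emod, List.getD_eq_getElem (pvXs points) 0 (by rw [hxs]; exact h)]
    have : (pvXs points)[i]'(by rw [hxs]; exact h) = points[i].1 := by
      simp [pvXs]
    rw [this]
  rw [pvFA]
  simp only
  rw [hnum, hden]
  rfl

lemma pv_A_canon (points : List (Int × Int)) :
    lagrange_at_zero points = List.foldl pvGen 0 (pvCanon points) := by
  rw [pv_A_shape, ← List.foldl_map]
  congr 1
  apply List.ext_getElem
  · simp [pvCanon]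
  · intro i h1 h2
    rw [List.getElem_map]
    rw [pv_enum_get points 0 i (by simpa [pv_enum_len] using h1)]
    rw [pv_li0A points i (by simpa [pv_enum_len] using h1)]
    simp only [pvCanon, List.getElem_map, List.getElem_range]
    rw [List.getD_eq_getElem points (0,0) (by simpa [pv_enum_len] using h1)]

-- named pieces of port B
def pvNegs (points : List (Int × Int)) : List Int := points.map (fun q => (-q.1) % pvP)

def pvPre (points : List (Int × Int)) : List Int :=
  ((pvNegs points).foldl (fun st v => (st.1 ++ [(st.2 * v) % pvP], (st.2 * v) % pvP)) ([1], 1)).1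

def pvSuf (points : List (Int × Int)) : List Int :=
  (((pvNegs points).reverse.foldl
      (fun st v => (st.1 ++ [(st.2 * v) % pvP], (st.2 * v) % pvP)) ([1], 1)).1).reverse

def pvNums (points : List (Int × Int)) : List Int :=
  ((pvPre points).zip ((pvSuf points).drop 1)).map (fun ab => (ab.1 * ab.2) % pvP)

def pvMPort (points : List (Int × Int)) : List Int :=
  points.foldl (fun m q =>
      ((m.foldl (fun st c => (st.1 ++ [(st.2 - q.1 * c) % pvP], c)) ([], 0)).1
        ++ [(m.foldl (fun st c => (st.1 ++ [(st.2 - q.1 * c) % pvP], c)) ([], 0)).2])) [1]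

def pvD (points : List (Int × Int)) : List Int :=
  (PySem.List.enumerate ((pvMPort points).drop 1)).map (fun kc => ((kc.1 + 1) * kc.2) % pvP)

def pvFB (d : List Int) (pn : (Int × Int) × Int) : Int × Int :=
  (pn.1.2,
    (pn.2 * pvPowMod (d.reverse.foldl (fun den c => (den * pn.1.1 + c) % pvP) 0) pvE pvP) % pvP)

lemma pv_slice1 {α : Type} (l : List α) : PySem.List.slice l (some 1) = l.drop 1 := by
  rw [PySem.List.slice_from l (by norm_num)]
  rfl

lemma pv_B_shape (points : List (Int × Int)) :
    lagrange_at_zero_alt points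
      = (points.zip (pvNums points)).foldl (fun s pn => pvGen s (pvFB (pvD points) pn)) 0 := by
  unfold lagrange_at_zero_alt
  simp only [pm, pv_slice1]
  rfl

lemma pv_pre_eq (points : List (Int × Int)) :
    pvPre points = [1] ++ (List.range (pvNegs points).length).map
      (fun t => (1 * ((pvNegs points).take (t+1)).prod) % pvP) := by
  unfold pvPre
  rw [pv_scanl _ _ _ pvB_one]

lemma pv_suf_eq (points : List (Int × Int)) :
    pvSuf points = ([1] ++ (List.range (pvNegs points).length).map
      (fun t => (1 * ((pvNegs points).reverse.take (t+1)).prod) % pvP)).reverse := by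
  unfold pvSuf
  rw [pv_scanl _ _ _ pvB_one, List.length_reverse]

lemma pv_pre_len (points : List (Int × Int)) :
    (pvPre points).length = (pvNegs points).length + 1 := by
  rw [pv_pre_eq]; simp

lemma pv_suf_len (points : List (Int × Int)) :
    (pvSuf points).length = (pvNegs points).length + 1 := by
  rw [pv_suf_eq]; simp

lemma pv_pre_get (points : List (Int × Int)) (i : ℕ) (hi : i ≤ (pvNegs points).length) :
    (pvPre points)[i]'(by rw [pv_pre_len]; omega) = ((pvNegs points).take i).prod % pvP := by
  cases i with
  | zero =>
    simp only [pv_pre_eq, List.singleton_append, List.getElem_cons_zero, List.take_zero,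
      List.prod_nil]
    rw [Int.emod_eq_of_lt (by norm_num) pvP_one_lt]
  | succ j =>
    simp only [pv_pre_eq, List.singleton_append, List.getElem_cons_succ]
    rw [List.getElem_map, List.getElem_range, one_mul]

lemma pv_raw_get (points : List (Int × Int)) (j : ℕ) (hj : j < (pvNegs points).length + 1) :
    ([1] ++ (List.range (pvNegs points).length).map
        (fun t => (1 * ((pvNegs points).reverse.take (t+1)).prod) % pvP))[j]'(by simp; omega)
      = (((pvNegs points).reverse.take j).prod) % pvP := by
  cases j with
  | zero =>
    simp only [List.singleton_append, List.getElem_cons_zero, List.take_zero, List.prod_nil]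
    rw [Int.emod_eq_of_lt (by norm_num) pvP_one_lt]
  | succ u =>
    simp only [List.singleton_append, List.getElem_cons_succ]
    rw [List.getElem_map, List.getElem_range, one_mul]

lemma pv_suf_get (points : List (Int × Int)) (u : ℕ) (hu : u ≤ (pvNegs points).length) :
    (pvSuf points)[u]'(by rw [pv_suf_len]; omega) = ((pvNegs points).drop u).prod % pvP := by
  simp only [pv_suf_eq]
  rw [List.getElem_reverse]
  simp only [List.length_append, List.length_singleton, List.length_map, List.length_range,
    Nat.add_sub_cancel_left]
  rw [pv_raw_get points ((pvNegs points).length - u) (by omega)]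
  rw [List.take_reverse, List.prod_reverse]
  congr 3
  omega

lemma pv_nums_len (points : List (Int × Int)) : (pvNums points).length = points.length := by
  simp [pvNums, pv_pre_len, pv_suf_len, pvNegs]

lemma pv_nums_get (points : List (Int × Int)) (i : ℕ) (h : i < points.length) :
    (pvNums points)[i]'(by rw [pv_nums_len]; exact h) = pvNUM (pvXs points) i := by
  have hn : (pvNegs points).length = points.length := by simp [pvNegs]
  simp only [pvNums, List.getElem_map, List.getElem_zip, List.getElem_drop]
  rw [pv_pre_get points i (by omega), pv_suf_get points (1 + i) (by omega), pv_mulmod2,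
    Nat.add_comm 1 i, ← List.prod_append, ← List.eraseIdx_eq_take_drop_succ]
  unfold pvNegs
  rw [List.eraseIdx_map,
    show (fun q : Int × Int => (-q.1) % pvP)
        = ((fun a : Int => a % pvP) ∘ (fun q : Int × Int => -q.1)) from rfl,
    ← List.map_map, pv_prod_map_emod,
    show (fun q : Int × Int => -q.1)
        = ((fun a : Int => -a) ∘ Prod.fst) from rfl,
    ← List.map_map, ← List.eraseIdx_map]
  rfl

lemma pv_evalDL_drop (x : Int) (l : List Int) (h : l ≠ []) :
    pvEvalDL x (0 :: l.drop 1) = pvEvalDL x l := by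
  cases l with
  | nil => exact absurd rfl h
  | cons c t => simp [pvEvalDL]

lemma pv_den_get (points : List (Int × Int)) (i : ℕ) (h : i < points.length) :
    (pvD points).reverse.foldl (fun den c => (den * points[i].1 + c) % pvP) 0
      = pvDEN (pvXs points) i := by
  have hxslen : (pvXs points).length = points.length := by simp [pvXs]
  have hb := pv_horner (points[i].1) (pvD points)
  apply pv_eq_of_B hb.1 (pvB_emod _)
  rw [hb.2]
  have hD : pvD points = (PySem.List.enumerate ((pvMZ (pvXs points)).drop 1)).map
      (fun kc => ((kc.1 + 1) * (kc.2 % pvP)) % pvP) := by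
    unfold pvD
    rw [show pvMPort points = (pvMZ (pvXs points)).map (fun a => a % pvP) from pv_m_port points,
      ← List.map_drop, pv_enum_map, List.map_map]
    rfl
  rw [hD, pv_weighted_mod, pv_weighted, zero_mul, zero_add,
    pv_evalDL_drop _ _ (pv_mz_ne_nil (pvXs points)), pv_evalDL_mz]
  have hxi : points[i].1 = (pvXs points)[i]'(by rw [hxslen]; exact h) := by simp [pvXs]
  rw [hxi, pv_DN_get (pvXs points) i (by rw [hxslen]; exact h)]
  rw [pv_emod_emod, List.getD_eq_getElem (pvXs points) 0 (by rw [hxslen]; exact h)]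

lemma pv_B_map (points : List (Int × Int)) :
    (points.zip (pvNums points)).map (pvFB (pvD points)) = pvCanon points := by
  apply List.ext_getElem
  · simp [pvCanon, pv_nums_len]
  · intro i h1 h2
    have hi : i < points.length := by simp [pv_nums_len] at h1; omega
    rw [List.getElem_map, List.getElem_zip]
    unfold pvFB
    simp only
    rw [pv_nums_get points i hi, pv_den_get points i hi]
    simp only [pvCanon, List.getElem_map, List.getElem_range]
    rw [List.getD_eq_getElem points (0, 0) hi]
    rfl

lemma pv_B_canon (points : List (Int × Int)) :
    lagrange_at_zero_alt points = List.foldl pvGen 0 (pvCanon points) := by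
  rw [pv_B_shape, ← List.foldl_map, pv_B_map]

-- ===== VERDICT (by name: the statement is the Claim_ definition above) =====
theorem lagrange_at_zero_spec : Claim_equal_lagrange_at_zero := by
  intro points _
  unfold Spec_lagrange_at_zero
  rw [pv_A_canon, pv_B_canon]
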